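-- pv_equiv track=rewrite | github.com/boostcampaitech6/level2-3-nlp-finalproject-nlp-08 | scripts/utils.py | find_sentence_at_index
-- ===== SOURCE A (Python) =====
-- def find_sentence_at_index(text, target_index):
--     '''여러 문장들이 있는 스트링에서 특정 인덱스를 받으면 해당 인덱스를 포함하는 문장을 리턴하는 함수'''
--     sentences = text.split('.')  # 마침표를 기준으로 문장을 분리합니다.
--     current_index = 0
--     for sentence in sentences:
--         sentence_length = len(sentence) + 1  # 현재 문장의 길이와 마침표(1)를 더합니다.
--         if target_index < current_index + sentence_length:
--             start_index = current_index
--             end_index = current_index + sentence_length - 1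
--             return sentence.strip(), start_index, end_index
--         current_index += sentence_length
--     return None, None, None
-- ===== SOURCE B (Python) =====
-- def _bisect_right(a, x):
--     lo, hi = 0, len(a)
--     while lo < hi:
--         mid = (lo + hi) // 2
--         if x < a[mid]:
--             hi = mid
--         else:
--             lo = mid + 1
--     return lo
--
--
-- def find_sentence_at_index(text, target_index):
--     sentences = text.split('.')
--     prefix = []
--     acc = 0
--     for s in sentences:
--         acc += len(s) + 1
--         prefix.append(acc)
--     i = _bisect_right(prefix, target_index)
--     if i == len(sentences):
--         return None, None, None
--     seg = sentences[i]
--     end = prefix[i]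
--     return seg.strip(), end - (len(seg) + 1), end - 1
-- ===== Notes on version B (the rewrite author's own statement) =====
-- stated objective: alternative
-- what changed: Replaces A's linear scan that accumulates an offset per sentence with a prefix table of cumulative segment ends plus a hand-rolled bisect_right binary search that locates the containing segment in one step.
import Mathlib
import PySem

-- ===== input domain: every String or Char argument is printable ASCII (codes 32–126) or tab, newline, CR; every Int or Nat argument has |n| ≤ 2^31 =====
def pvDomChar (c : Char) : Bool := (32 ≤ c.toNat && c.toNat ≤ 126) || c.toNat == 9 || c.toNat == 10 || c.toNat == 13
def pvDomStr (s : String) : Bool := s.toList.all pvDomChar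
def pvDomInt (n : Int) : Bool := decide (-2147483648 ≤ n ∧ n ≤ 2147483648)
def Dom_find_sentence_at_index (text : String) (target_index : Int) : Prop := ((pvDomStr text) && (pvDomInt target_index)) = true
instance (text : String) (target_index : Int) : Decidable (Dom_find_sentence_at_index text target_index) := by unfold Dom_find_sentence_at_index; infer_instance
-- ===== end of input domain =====

-- B replaces A's linear accumulate-and-compare scan by one prefix table of cumulative segment ends
-- plus a hand-rolled binary search (bisect_right); same return value, different traversal (alternative).

-- ===== PORT A =====
-- the for-loop of A: state = current_index, early return on the first matching sentence
def find_sentence_go (t : Int) : List String → Int → Option String × Option Int × Option Int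
  | [], _ => (none, none, none)
  | s :: rest, cur =>
      if t < cur + (PySem.Str.len s + 1) then
        (some (PySem.Str.strip s), some cur, some (cur + (PySem.Str.len s + 1) - 1))
      else
        find_sentence_go t rest (cur + (PySem.Str.len s + 1))

def find_sentence_at_index (text : String) (target_index : Int) : Option String × Option Int × Option Int :=
  find_sentence_go target_index ((PySem.Str.split? text ".").getD []) 0

-- ===== PORT B =====
-- the prefix-building loop of Source B: acc += len(s)+1; prefix.append(acc)
def pvPrefixEnds : List String → Int → List Int
  | [], _ => []
  | s :: rest, acc =>
      (acc + (PySem.Str.len s + 1)) :: pvPrefixEnds rest (acc + (PySem.Str.len s + 1))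

-- Source B's _bisect_right is CPython's bisect_right loop verbatim; PySem.List.bisectRight is that same loop
def find_sentence_at_index_alt (text : String) (target_index : Int) : Option String × Option Int × Option Int :=
  let sentences := (PySem.Str.split? text ".").getD []
  let pfx := pvPrefixEnds sentences 0
  let i := PySem.List.bisectRight pfx target_index
  if i = sentences.length then (none, none, none)
  else
    let seg := sentences.getD i ""
    let e := pfx.getD i 0
    (some (PySem.Str.strip seg), some (e - (PySem.Str.len seg + 1)), some (e - 1))

-- ===== PRECONDITION & SPEC =====
def Spec_find_sentence_at_index (text : String) (target_index : Int) (out : Option String × Option Int × Option Int) : Prop := out = find_sentence_at_index_alt text target_index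
instance (text : String) (target_index : Int) (out : Option String × Option Int × Option Int) : Decidable (Spec_find_sentence_at_index text target_index out) := by unfold Spec_find_sentence_at_index; infer_instance

-- ===== CLAIM (what is proved, stated in full; the proofs are below) =====
def Claim_equal_find_sentence_at_index : Prop := ∀ (text : String) (target_index : Int), Dom_find_sentence_at_index text target_index → Spec_find_sentence_at_index text target_index (find_sentence_at_index text target_index)

-- ===== LEMMAS AND PROOFS =====

theorem length_pvPrefixEnds (segs : List String) (cur : Int) :
    (pvPrefixEnds segs cur).length = segs.length := by
  induction segs generalizing cur with
  | nil => rfl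
  | cons s rest ih => simp [pvPrefixEnds, ih]

theorem lt_of_mem_pvPrefixEnds (segs : List String) (cur : Int) :
    ∀ x ∈ pvPrefixEnds segs cur, cur < x := by
  induction segs generalizing cur with
  | nil => simp [pvPrefixEnds]
  | cons s rest ih =>
    intro x hx
    have hlen : (0:Int) ≤ PySem.Str.len s := by simp [PySem.Str.len_eq]
    rcases (by simpa [pvPrefixEnds] using hx : x = cur + (PySem.Str.len s + 1) ∨
        x ∈ pvPrefixEnds rest (cur + (PySem.Str.len s + 1))) with h | h
    · omega
    · have := ih _ _ h; omega

theorem pairwise_pvPrefixEnds (segs : List String) (cur : Int) :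
    (pvPrefixEnds segs cur).Pairwise (· ≤ ·) := by
  induction segs generalizing cur with
  | nil => simp [pvPrefixEnds]
  | cons s rest ih =>
    refine List.pairwise_cons.mpr ⟨?_, ih _⟩
    intro x hx
    exact le_of_lt (lt_of_mem_pvPrefixEnds _ _ x hx)

/-- A's scan returns the entry at the unique split point `r` of the prefix-end table. -/
theorem find_sentence_go_spec (t : Int) :
    ∀ (segs : List String) (cur : Int) (r : Nat),
      r ≤ segs.length →
      (∀ j (hj : j < (pvPrefixEnds segs cur).length), j < r → (pvPrefixEnds segs cur)[j] ≤ t) →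
      (∀ j (hj : j < (pvPrefixEnds segs cur).length), r ≤ j → t < (pvPrefixEnds segs cur)[j]) →
      find_sentence_go t segs cur =
        if h : r < segs.length then
          (some (PySem.Str.strip segs[r]),
           some ((pvPrefixEnds segs cur)[r]'(by rw [length_pvPrefixEnds]; exact h) - (PySem.Str.len segs[r] + 1)),
           some ((pvPrefixEnds segs cur)[r]'(by rw [length_pvPrefixEnds]; exact h) - 1))
        else (none, none, none) := by
  intro segs
  induction segs with
  | nil =>
    intro cur r hr _ _
    simp [find_sentence_go]
  | cons s rest ih =>
    intro cur r hr hlo hhi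
    have hlen0 : 0 < (pvPrefixEnds (s :: rest) cur).length := by
      simp [pvPrefixEnds]
    by_cases ht : t < cur + (PySem.Str.len s + 1)
    · -- first sentence matches; r must be 0
      have ht' := ht; simp only [PySem.Str.len_eq, String.length_toList] at ht'
      have hr0 : r = 0 := by
        by_contra h0
        have := hlo 0 hlen0 (Nat.pos_of_ne_zero h0)
        simp [pvPrefixEnds] at this
        omega
      subst hr0
      simp [find_sentence_go, ht', pvPrefixEnds]
    · -- first sentence skipped; r must be positive
      have ht' := ht; simp only [PySem.Str.len_eq, String.length_toList] at ht'
      have hrpos : 0 < r := by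
        by_contra h0
        have := hhi 0 hlen0 (by omega)
        simp [pvPrefixEnds] at this
        exact ht' this
      obtain ⟨r', rfl⟩ : ∃ r', r = r' + 1 := ⟨r - 1, by omega⟩
      have hrec := ih (cur + (PySem.Str.len s + 1)) r' (by simpa using hr)
        (fun j hj hjr => by
          have := hlo (j+1) (by simpa [pvPrefixEnds] using Nat.succ_lt_succ hj) (by omega)
          simpa [pvPrefixEnds] using this)
        (fun j hj hjr => by
          have := hhi (j+1) (by simpa [pvPrefixEnds] using Nat.succ_lt_succ hj) (by omega)
          simpa [pvPrefixEnds] using this)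
      simp only [find_sentence_go, if_neg ht, hrec]
      by_cases hlt : r' < rest.length
      · simp [hlt, pvPrefixEnds]
      · simp [hlt]

-- ===== VERDICT (by name: the statement is the Claim_ definition above) =====
theorem find_sentence_at_index_spec : Claim_equal_find_sentence_at_index := by
  intro text t _
  have key : ∀ (segs : List String),
      find_sentence_go t segs 0 =
        (let pfx := pvPrefixEnds segs 0
         let i := PySem.List.bisectRight pfx t
         if i = segs.length then (none, none, none)
         else
           (some (PySem.Str.strip (segs.getD i "")),
            some (pfx.getD i 0 - (PySem.Str.len (segs.getD i "") + 1)),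
            some (pfx.getD i 0 - 1))) := by
    intro segs
    obtain ⟨hr_le, hlo, hhi⟩ :=
      PySem.List.bisectRight_spec (pvPrefixEnds segs 0) t (pairwise_pvPrefixEnds segs 0)
    have hlen := length_pvPrefixEnds segs 0
    rw [find_sentence_go_spec t segs 0 _ (by omega) hlo hhi]
    by_cases h : PySem.List.bisectRight (pvPrefixEnds segs 0) t < segs.length
    · rw [dif_pos h]
      rw [if_neg (by omega)]
      rw [List.getD_eq_getElem segs "" h, List.getD_eq_getElem _ 0 (by omega)]
    · rw [dif_neg h, if_pos (by omega)]
  unfold Spec_find_sentence_at_index find_sentence_at_index find_sentence_at_index_alt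
  exact key _
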